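-- pv_equiv track=rewrite | github.com/2BELLBELL/2BELLBELL | 백준/Silver/16953. A → B/A → B.py | dfs
-- ===== SOURCE A (Python) =====
-- def dfs(x, y):
--     cnt = 1
--     while True:
--         # 현재 숫자와 만들고자하는 숫자가 같으면 연산 횟수 반환
--         if x == y:
--             return cnt
--         # 현재 숫자가 목표 숫자를 지나쳐서 더 작아졌으면 -1 반환
--         elif x < y:
--             return -1
--
--         # 현재 숫자가 2로 나눠진다면 나누기
--         if x % 2 == 0:
--             x //= 2
--             cnt += 1
--         # 현재 숫자의 마지막 숫자가 1이라면 10으로 나누기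
--         elif list(map(int, str(x)))[-1] == 1:
--             x //= 10
--             cnt += 1
--         # 목표 숫자에 도달하기 전에 해당 조건이 없으면 -1 반환
--         else:
--             return -1
-- ===== SOURCE B (Python) =====
-- def dfs(x, y):
--     # Search upward from y over the inverse operations (*2, *10+1) instead of
--     # reducing x; the upward path to x is unique, so the first hit is the answer.
--     def climb(v, cnt):
--         if v == x:
--             return cnt
--         if v > x:
--             return -1
--         if v > 0:
--             r = climb(v * 2, cnt + 1)
--             if r != -1:
--                 return r
--         return climb(v * 10 + 1, cnt + 1)
--     return climb(y, 1)
-- ===== Notes on version B (the rewrite author's own statement) =====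
-- stated objective: alternative
-- what changed: Replaces A's deterministic descent of x (halve when even, strip a trailing 1) by a recursive search upward from y over the inverse operations (*2 and *10+1) bounded by x; the upward path to x is unique, so the first hit gives the same count.
-- outside the precondition, e.g. on dfs(3, -1): A returns -1, B raises RecursionError; on dfs(-2, -4): A raises ValueError, B raises RecursionError; on dfs(2, -1): A does not finish within the time limit, B raises RecursionError
import Mathlib
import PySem

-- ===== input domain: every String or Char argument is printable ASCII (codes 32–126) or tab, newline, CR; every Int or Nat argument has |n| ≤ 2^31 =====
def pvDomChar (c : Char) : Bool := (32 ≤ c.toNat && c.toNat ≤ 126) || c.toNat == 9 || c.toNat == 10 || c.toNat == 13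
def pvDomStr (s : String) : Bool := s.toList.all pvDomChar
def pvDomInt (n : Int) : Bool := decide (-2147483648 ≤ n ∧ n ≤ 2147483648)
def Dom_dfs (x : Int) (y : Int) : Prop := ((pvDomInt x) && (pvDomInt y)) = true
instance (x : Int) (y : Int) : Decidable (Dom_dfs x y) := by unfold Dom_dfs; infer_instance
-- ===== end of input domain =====

-- B searches upward from y over the inverse operations instead of descending x; same return value on Pre_.

-- ===== PORT A =====
-- list(map(int, str(x))) : int(c) = code c - 48 on the digit characters this reaches under Pre_
-- ('-' would raise ValueError in Python; Pre_ excludes the inputs whose descent meets a negative x)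
def pyDigitsA (x : Int) : List Int := (PySem.Int.toChars x).map (fun c => ((c.toNat : Int) - 48))

-- the 'while True' loop of A, state (x, cnt); fuel only makes it total (the loop
-- does not terminate for some y < 0, outside Pre_); under Pre_ the fuel below suffices
def loopA : Nat → Int → Int → Int → Int
  | 0, _, _, _ => -1
  | fuel+1, x, y, cnt =>
    if x = y then cnt
    else if x < y then -1
    else if PySem.Int.mod x 2 = 0 then loopA fuel (PySem.Int.floordiv x 2) y (cnt + 1)
    else if PySem.List.pyGet? (pyDigitsA x) (-1) = some 1 then
      loopA fuel (PySem.Int.floordiv x 10) y (cnt + 1)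
    else -1

def dfs (x : Int) (y : Int) : Int := loopA ((x - y).toNat + 1) x y 1

-- ===== PORT B =====
-- climb(v, cnt) of Source B; fuel only makes the recursion total (Source B overflows the
-- stack for some y < 0, outside Pre_); under Pre_ the fuel below suffices
def climbB : Nat → Int → Int → Int → Int
  | 0, _, _, _ => -1
  | fuel+1, x, v, cnt =>
    if v = x then cnt
    else if x < v then -1
    else if 0 < v then
      let r := climbB fuel x (v * 2) (cnt + 1)
      if r ≠ -1 then r else climbB fuel x (v * 10 + 1) (cnt + 1)
    else climbB fuel x (v * 10 + 1) (cnt + 1)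

def dfs_alt (x : Int) (y : Int) : Int := climbB ((x - y).toNat + 1) x y 1

-- ===== PRECONDITION & SPEC =====
-- Pre_ excludes y < 0 with x > y, where A raises ValueError (str of a negative x reached by the
-- descent), loops forever (descent reaching 0), or returns -1 while B's upward search from a
-- negative y recurses without bound (RecursionError in Python).
def Pre_dfs (x : Int) (y : Int) : Prop := 0 ≤ y ∨ x ≤ y
instance (x : Int) (y : Int) : Decidable (Pre_dfs x y) := by unfold Pre_dfs; infer_instance

def pvWitness_dfs : Int × Int := (2, 1)

def Spec_dfs (x : Int) (y : Int) (out : Int) : Prop := out = dfs_alt x y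
instance (x : Int) (y : Int) (out : Int) : Decidable (Spec_dfs x y out) := by unfold Spec_dfs; infer_instance

-- ===== CLAIM (what is proved, stated in full; the proofs are below) =====
def Claim_equal_dfs : Prop := ∀ (x : Int) (y : Int), Dom_dfs x y → Pre_dfs x y → Spec_dfs x y (dfs x y)

-- ===== LEMMAS AND PROOFS =====

-- the deterministic descent of A, abstracted: number of steps from x down to v (none = stuck)
def desc (x v : Int) : Option Nat :=
  if x = v then some 0
  else if x < v then none
  else if x ≤ 0 then none
  else if x % 2 = 0 then (desc (x / 2) v).map (· + 1)
  else if x % 10 = 1 then (desc (x / 10) v).map (· + 1)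
  else none
termination_by x.toNat
decreasing_by all_goals omega

theorem desc_self (x : Int) : desc x x = some 0 := by
  rw [desc]; simp

theorem desc_of_lt {x v : Int} (h : x < v) : desc x v = none := by
  rw [desc]; simp [show x ≠ v by omega, h]

theorem desc_even {x v : Int} (h1 : v < x) (h2 : 0 < x) (h3 : x % 2 = 0) :
    desc x v = (desc (x / 2) v).map (· + 1) := by
  rw [desc]; simp [show ¬ x = v by omega, show ¬ x < v by omega, show ¬ x ≤ 0 by omega, h3]

theorem desc_ten {x v : Int} (h1 : v < x) (h2 : 0 < x) (h3 : x % 2 ≠ 0) (h4 : x % 10 = 1) :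
    desc x v = (desc (x / 10) v).map (· + 1) := by
  rw [desc]; simp [show ¬ x = v by omega, show ¬ x < v by omega, show ¬ x ≤ 0 by omega, h3, h4]

theorem desc_stuck {x v : Int} (h1 : v < x) (h2 : 0 < x) (h3 : x % 2 ≠ 0) (h4 : x % 10 ≠ 1) :
    desc x v = none := by
  rw [desc]; simp [show ¬ x = v by omega, show ¬ x < v by omega, show ¬ x ≤ 0 by omega, h3, h4]

-- the unique-predecessor decomposition: descending from x to v > … ends with a step from 2v
-- (if v > 0) or from 10v+1, and these alternatives are tried in this order by B
theorem desc_D : ∀ (n : Nat) (x v : Int), x.toNat ≤ n → 0 ≤ v → v < x →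
    desc x v = (if 0 < v ∧ (desc x (v * 2)).isSome then (desc x (v * 2)).map (· + 1)
                else (desc x (v * 10 + 1)).map (· + 1)) := by
  intro n
  induction n with
  | zero => intro x v hxn hv hvx; omega
  | succ n ih =>
    intro x v hxn hv hvx
    have hx1 : 1 ≤ x := by omega
    by_cases h2 : x % 2 = 0
    · -- x even: the descent step from x goes to x / 2
      rw [desc_even hvx (by omega) h2]
      rcases lt_trichotomy (x / 2) v with hc | hc | hc
      · rw [desc_of_lt hc, desc_of_lt (show x < v * 2 by omega),
            desc_of_lt (show x < v * 10 + 1 by omega)]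
        simp
      · rw [hc, desc_self, show v * 2 = x by omega, desc_self,
            if_pos ⟨by omega, by simp⟩]
      · rw [ih (x / 2) v (by omega) hv hc,
            desc_even (show v * 2 < x by omega) (by omega) h2]
        by_cases hcc : x < v * 10 + 1
        · rw [desc_of_lt hcc, desc_of_lt (show x / 2 < v * 10 + 1 by omega)]
          by_cases hcond : 0 < v ∧ (desc (x / 2) (v * 2)).isSome
          · simp [hcond.1, hcond.2]
          · simp only [Option.isSome_map]
            rw [if_neg hcond, if_neg hcond]
            simp
        · rw [desc_even (show v * 10 + 1 < x by omega) (by omega) h2]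
          by_cases hcond : 0 < v ∧ (desc (x / 2) (v * 2)).isSome
          · simp [hcond.1, hcond.2, Option.map_map]
          · simp only [Option.isSome_map]
            rw [if_neg hcond, if_neg hcond]
    · by_cases h10 : x % 10 = 1
      · -- x odd with last digit 1: the descent step from x goes to x / 10
        rw [desc_ten hvx (by omega) h2 h10]
        rcases lt_trichotomy (x / 10) v with hc | hc | hc
        · have e2 : desc x (v * 2) = none := by
            rcases lt_trichotomy x (v * 2) with h | h | h
            · exact desc_of_lt h
            · omega
            · rw [desc_ten h (by omega) h2 h10, desc_of_lt (show x / 10 < v * 2 by omega)]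
              rfl
          rw [desc_of_lt hc, e2, desc_of_lt (show x < v * 10 + 1 by omega)]
          simp
        · have hx10 : x = v * 10 + 1 := by omega
          rcases eq_or_lt_of_le hv with hv0 | hvpos
          · subst hv0
            have hx' : x = 1 := by omega
            subst hx'
            simp only [show (0:Int) * 2 = 0 from by ring, show (0:Int) * 10 + 1 = 1 from by ring]
            rw [show (1:Int) / 10 = 0 from by norm_num, desc_self, desc_self]
            simp
          · rw [hc, desc_self,
                desc_ten (show v * 2 < x by omega) (by omega) h2 h10, hc,
                desc_of_lt (show v < v * 2 by omega),
                show v * 10 + 1 = x from hx10.symm, desc_self]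
            simp
        · rw [ih (x / 10) v (by omega) hv hc,
              desc_ten (show v * 2 < x by omega) (by omega) h2 h10,
              desc_ten (show v * 10 + 1 < x by omega) (by omega) h2 h10]
          by_cases hcond : 0 < v ∧ (desc (x / 10) (v * 2)).isSome
          · simp [hcond.1, hcond.2, Option.map_map]
          · simp only [Option.isSome_map]
            rw [if_neg hcond, if_neg hcond]
      · -- x odd, last digit ≠ 1: the descent is stuck at x, and x is no image of * 2 / * 10 + 1
        rw [desc_stuck hvx (by omega) h2 h10]
        have e2 : desc x (v * 2) = none := by
          rcases lt_trichotomy x (v * 2) with hcc | hcc | hcc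
          · exact desc_of_lt hcc
          · omega
          · exact desc_stuck hcc (by omega) h2 h10
        have e10 : desc x (v * 10 + 1) = none := by
          rcases lt_trichotomy x (v * 10 + 1) with hcc | hcc | hcc
          · exact desc_of_lt hcc
          · omega
          · exact desc_stuck hcc (by omega) h2 h10
        rw [e2, e10]
        simp

-- str(x) ends with the character of the last decimal digit
theorem toDigitsCore_append : ∀ (f n : Nat) (acc : List Char),
    Nat.toDigitsCore 10 f n acc = Nat.toDigitsCore 10 f n [] ++ acc := by
  intro f
  induction f with
  | zero => intro n acc; simp [Nat.toDigitsCore]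
  | succ f ih =>
    intro n acc
    simp only [Nat.toDigitsCore]
    by_cases h : n / 10 = 0
    · simp [h]
    · simp only [if_neg h]
      rw [ih (n / 10) [Nat.digitChar (n % 10)], ih (n / 10) (Nat.digitChar (n % 10) :: acc)]
      simp

theorem toDigits_last (n : Nat) : ∃ L, Nat.toDigits 10 n = L ++ [Nat.digitChar (n % 10)] := by
  unfold Nat.toDigits
  simp only [Nat.toDigitsCore]
  by_cases h : n / 10 = 0
  · exact ⟨[], by simp [h]⟩
  · refine ⟨Nat.toDigitsCore 10 n (n / 10) [], ?_⟩
    simp only [if_neg h]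
    exact toDigitsCore_append n (n / 10) [Nat.digitChar (n % 10)]

theorem lastDig (x : Int) (hx : 1 ≤ x) :
    PySem.List.pyGet? (pyDigitsA x) (-1) = some (x % 10) := by
  unfold pyDigitsA
  unfold PySem.Int.toChars
  rw [if_neg (by omega)]
  obtain ⟨L, hL⟩ := toDigits_last x.toNat
  rw [hL, List.map_append, List.map_singleton, PySem.List.pyGet?_neg_one_append_singleton]
  have hm : x.toNat % 10 < 10 := Nat.mod_lt _ (by norm_num)
  have hdig : ((Nat.digitChar (x.toNat % 10)).toNat : Int) - 48 = (x.toNat % 10 : Nat) := by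
    interval_cases h : x.toNat % 10 <;> decide
  rw [hdig]
  congr 1
  omega

theorem loopA_desc : ∀ (fuel : Nat) (x y cnt : Int), 0 ≤ y → (x - y).toNat < fuel →
    loopA fuel x y cnt = (match desc x y with | some k => cnt + (k : Int) | none => -1) := by
  intro fuel
  induction fuel with
  | zero => intro x y cnt hy hf; omega
  | succ fuel ih =>
    intro x y cnt hy hf
    simp only [loopA]
    by_cases hxy : x = y
    · subst hxy; simp [desc_self]
    · rw [if_neg hxy]
      by_cases hlt : x < y
      · simp [hlt, desc_of_lt hlt]
      · rw [if_neg hlt]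
        have hx1 : 1 ≤ x := by omega
        rw [show PySem.Int.mod x 2 = x % 2 from PySem.Int.mod_eq_emod_of_pos (by norm_num),
            show PySem.Int.floordiv x 2 = x / 2 from PySem.Int.floordiv_eq_ediv_of_pos (by norm_num),
            show PySem.Int.floordiv x 10 = x / 10 from PySem.Int.floordiv_eq_ediv_of_pos (by norm_num),
            lastDig x hx1]
        by_cases h2 : x % 2 = 0
        · rw [if_pos h2, desc_even (by omega) (by omega) h2,
              ih (x / 2) y (cnt + 1) hy (by omega)]
          cases desc (x / 2) y with
          | some k => simp; ring
          | none => simp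
        · rw [if_neg h2]
          by_cases h10 : x % 10 = 1
          · rw [if_pos (by rw [h10]), desc_ten (by omega) (by omega) h2 h10,
                ih (x / 10) y (cnt + 1) hy (by omega)]
            cases desc (x / 10) y with
            | some k => simp; ring
            | none => simp
          · rw [if_neg (by simp [h10]), desc_stuck (by omega) (by omega) h2 h10]

theorem climbB_desc : ∀ (fuel : Nat) (x v cnt : Int), 0 ≤ v → 1 ≤ cnt → (x - v).toNat < fuel →
    climbB fuel x v cnt = (match desc x v with | some k => cnt + (k : Int) | none => -1) := by
  intro fuel
  induction fuel with
  | zero => intro x v cnt hv hc hf; omega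
  | succ fuel ih =>
    intro x v cnt hv hc hf
    simp only [climbB]
    by_cases hvx : v = x
    · subst hvx; simp [desc_self]
    · rw [if_neg hvx]
      by_cases hlt : x < v
      · simp [hlt, desc_of_lt hlt]
      · rw [if_neg hlt]
        have hvx' : v < x := by omega
        rw [desc_D x.toNat x v (by omega) hv hvx']
        by_cases hpos : 0 < v
        · rw [if_pos hpos]
          rw [ih x (v * 2) (cnt + 1) (by omega) (by omega) (by omega)]
          cases h2 : desc x (v * 2) with
          | some k =>
            have hne : (cnt + 1 + (k : Int)) ≠ -1 := by omega
            simp [hpos, hne]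
            ring
          | none =>
            simp only [Option.isSome_none, Bool.false_eq_true, and_false, if_false,
              Option.map_none, ne_eq, not_true_eq_false]
            rw [ih x (v * 10 + 1) (cnt + 1) (by omega) (by omega) (by omega)]
            cases desc x (v * 10 + 1) with
            | some k => simp; ring
            | none => simp
        · rw [if_neg hpos, if_neg (by simp [hpos])]
          rw [ih x (v * 10 + 1) (cnt + 1) (by omega) (by omega) (by omega)]
          cases desc x (v * 10 + 1) with
          | some k => simp; ring
          | none => simp

-- ===== VERDICT (by name: the statement is the Claim_ definition above) =====
theorem dfs_spec : Claim_equal_dfs := by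
  intro x y _ hpre
  unfold Spec_dfs dfs dfs_alt
  rcases le_or_gt 0 y with hy | hy
  · rw [loopA_desc _ x y 1 hy (by omega), climbB_desc _ x y 1 hy (by omega) (by omega)]
  · rcases hpre with h | h
    · omega
    · rcases eq_or_lt_of_le h with rfl | hlt
      · simp [loopA, climbB]
      · simp [loopA, climbB, show x ≠ y by omega, show y ≠ x by omega, hlt]
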